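-- pv_equiv track=rewrite | github.com/robotrocketscience/aelfrice | src/aelfrice/expansion_gate.py | _starts_with_question_form
-- ===== SOURCE A (Python) =====
-- from typing import TYPE_CHECKING, Final
--
-- _QUESTION_FORM_PREFIXES: Final[tuple[str, ...]] = (
--     "what",
--     "why",
--     "how",
--     "which",
--     "who",
--     "tell me",
--     "explain",
-- )
--
-- def _starts_with_question_form(text: str) -> bool:
--     """Return ``True`` if ``text`` begins with a recognised
--     question-form prefix (case-insensitive).
--     """
--     lowered = text.lstrip().lower()
--     for prefix in _QUESTION_FORM_PREFIXES:
--         if lowered.startswith(prefix):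
--             # Require a word boundary so ``whatever`` doesn't match
--             # ``what``. End-of-string or any non-alnum char qualifies.
--             tail_pos = len(prefix)
--             if tail_pos >= len(lowered):
--                 return True
--             tail = lowered[tail_pos]
--             if not tail.isalnum() and tail != "_":
--                 return True
--     return False
-- ===== SOURCE B (Python) =====
-- # B: instead of scanning seven prefixes with startswith + boundary checks,
-- # tokenise once: extract the leading word-character run and compare it against
-- # the question words (plus the two-word "tell me" case).
--
-- _QUESTION_WORDS = frozenset({"what", "why", "how", "which", "who", "explain"})
--
--
-- def _word_run(s):
--     """Leading run of word characters (alphanumerics or underscore)."""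
--     run = []
--     for ch in s:
--         if not (ch.isalnum() or ch == "_"):
--             break
--         run.append(ch)
--     return "".join(run)
--
--
-- def _starts_with_question_form(text):
--     lowered = text.lstrip().lower()
--     first = _word_run(lowered)
--     if first in _QUESTION_WORDS:
--         return True
--     return first == "tell" and lowered[4:5] == " " and _word_run(lowered[5:]) == "me"
-- ===== Notes on version B (the rewrite author's own statement) =====
-- stated objective: alternative
-- what changed: Instead of scanning seven prefixes with startswith plus a per-prefix word-boundary check, B tokenises the lowered text once (leading word-character run) and does a set membership test on that first word, handling the single two-word prefix by one extra second-word comparison.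
import Mathlib
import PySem

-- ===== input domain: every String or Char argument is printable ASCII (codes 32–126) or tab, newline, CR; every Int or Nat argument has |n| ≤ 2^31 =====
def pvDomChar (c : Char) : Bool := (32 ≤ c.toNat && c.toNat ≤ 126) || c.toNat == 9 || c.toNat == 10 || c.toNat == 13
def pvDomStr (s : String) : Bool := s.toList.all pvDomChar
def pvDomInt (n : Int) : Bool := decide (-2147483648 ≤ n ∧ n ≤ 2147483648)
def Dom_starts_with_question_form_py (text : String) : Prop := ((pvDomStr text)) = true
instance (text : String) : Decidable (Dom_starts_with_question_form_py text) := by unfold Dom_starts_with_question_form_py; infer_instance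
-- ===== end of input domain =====

-- B replaces A's seven startswith-plus-boundary-check scans by tokenising once:
-- it extracts the leading word-character run and compares it against the
-- question words (objective: alternative decomposition, same cost).

-- ===== PORT A =====
def pvQuestionFormPrefixes : List String := ["what", "why", "how", "which", "who", "tell me", "explain"]

-- A's for-loop over the prefixes, with its early returns
def pvALoop (lowered : String) : List String → Bool
  | [] => false
  | pfx :: rest =>
    if PySem.Str.startswith lowered pfx then
      let tailPos : Int := PySem.Str.len pfx
      if tailPos ≥ PySem.Str.len lowered then true
      else
        match PySem.Str.pyGet? lowered tailPos with
        | some tail => if (!PySem.Chars.isalnum tail) && !(tail == '_') then true else pvALoop lowered rest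
        | none => pvALoop lowered rest   -- unreachable: tailPos is in range here
    else pvALoop lowered rest

def starts_with_question_form_py (text : String) : Bool :=
  pvALoop (PySem.Str.lower (PySem.Str.lstrip text)) pvQuestionFormPrefixes

-- ===== PORT B =====
def pvIsWordChar (c : Char) : Bool := PySem.Chars.isalnum c || c == '_'

-- Source B's _word_run: the leading run of word characters
def pvWordRun : List Char → List Char
  | [] => []
  | c :: rest => if !pvIsWordChar c then [] else c :: pvWordRun rest

def pvQuestionWords : List (List Char) := ["what", "why", "how", "which", "who", "explain"].map String.toList

def starts_with_question_form_py_alt (text : String) : Bool :=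
  let lowered := (PySem.Str.lower (PySem.Str.lstrip text)).toList
  let first := pvWordRun lowered
  if pvQuestionWords.contains first then true
  else (first == "tell".toList)
       && ((PySem.List.slice lowered (some 4) (some 5) == [' '])
       && (pvWordRun (PySem.List.slice lowered (some 5) none) == "me".toList))

-- ===== PRECONDITION & SPEC =====
def Spec_starts_with_question_form_py (text : String) (out : Bool) : Prop := out = starts_with_question_form_py_alt text
instance (text : String) (out : Bool) : Decidable (Spec_starts_with_question_form_py text out) := by unfold Spec_starts_with_question_form_py; infer_instance

-- ===== CLAIM (what is proved, stated in full; the proofs are below) =====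
def Claim_equal_starts_with_question_form_py : Prop := ∀ (text : String), Dom_starts_with_question_form_py text → Spec_starts_with_question_form_py text (starts_with_question_form_py text)

-- ===== LEMMAS AND PROOFS =====

-- one iteration of A's loop, as a Bool function of the char lists
def pvCheckA (p l : List Char) : Bool :=
  if p <+: l then
    if l.length ≤ p.length then true
    else
      match l[p.length]? with
      | some tail => (!PySem.Chars.isalnum tail) && !(tail == '_')
      | none => false
  else false

theorem pv_startswith_decide (s p : List Char) :
    PySem.Chars.startswith s p = decide (p <+: s) := by
  by_cases h : p <+: s
  · simp [PySem.Chars.startswith_iff, h]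
  · have h2 : PySem.Chars.startswith s p = false := by
      rw [← Bool.not_eq_true, PySem.Chars.startswith_iff]; exact h
    simp [h2, h]

-- A's check for an all-word-character prefix is exactly "the leading word run equals the prefix"
theorem pvCheckA_word (p : List Char) (hp : p.all pvIsWordChar = true) (l : List Char) :
    pvCheckA p l = (pvWordRun l == p) := by
  induction p generalizing l with
  | nil =>
    cases l with
    | nil => simp [pvCheckA, pvWordRun]
    | cons c l' =>
      simp only [pvCheckA, pvWordRun]
      by_cases hc : pvIsWordChar c = true
      · rcases Bool.or_eq_true_iff.mp hc with h | h <;> simp_all [pvIsWordChar]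
      · simp only [pvIsWordChar, Bool.or_eq_true_iff, beq_iff_eq, not_or] at hc
        simp_all [pvIsWordChar]
  | cons a p' ih =>
    simp only [List.all_cons, Bool.and_eq_true] at hp
    obtain ⟨ha, hp'⟩ := hp
    cases l with
    | nil => simp [pvCheckA, pvWordRun]
    | cons c l' =>
      have hih := ih hp' l'
      simp only [pvCheckA] at hih
      simp only [pvCheckA, List.cons_prefix_cons, List.length_cons, List.getElem?_cons_succ,
        Nat.add_le_add_iff_right]
      by_cases hac : a = c
      · subst hac
        by_cases hpre : p' <+: l'
        · rw [if_pos hpre] at hih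
          rw [if_pos ⟨rfl, hpre⟩, hih]
          simp [pvWordRun, ha]
        · rw [if_neg hpre] at hih
          rw [if_neg (by tauto)]
          simp [pvWordRun, ha, ← hih]
      · rw [if_neg (fun h => hac h.1)]
        by_cases hc : pvIsWordChar c = true
        · simp only [pvWordRun, hc, Bool.not_true, Bool.false_eq_true, if_false,
            List.cons_beq_cons]
          have hca : (c == a) = false := beq_eq_false_iff_ne.mpr (fun h => hac (Eq.symm h))
          simp [hca]
        · simp [pvWordRun, hc]

-- A's check for "tell me": first word "tell", one space, then word "me" at its own boundary
theorem pvCheckA_tellme (l : List Char) :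
    pvCheckA ['t','e','l','l',' ','m','e'] l
      = ((pvWordRun l == ['t','e','l','l'])
          && ((l.drop 4).take 1 == [' '])
          && (pvWordRun (l.drop 5) == ['m','e'])) := by
  match l with
  | [] => decide
  | [a] => simp [pvCheckA, pvWordRun]
  | [a,b] => simp [pvCheckA, pvWordRun]
  | [a,b,c] => simp [pvCheckA, pvWordRun]
  | [a,b,c,d] => simp [pvCheckA, pvWordRun]
  | a :: b :: c :: d :: e :: rest =>
    simp only [pvCheckA, List.cons_prefix_cons, List.drop_succ_cons, List.drop_zero,
      List.take_succ_cons, List.take_zero, List.length_cons, List.getElem?_cons_succ]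
    by_cases h1 : 't' = a; swap
    · rw [if_neg (fun h => h1 h.1)]
      have : (a == 't') = false := beq_eq_false_iff_ne.mpr (fun h => h1 (Eq.symm h))
      simp [pvWordRun, List.cons_beq_cons, this]
      by_cases hwa : pvIsWordChar a = true <;> simp [hwa] <;>
        exact fun h => absurd (Eq.symm h) h1
    by_cases h2 : 'e' = b; swap
    · rw [if_neg (fun h => h2 h.2.1)]
      subst h1
      have : (b == 'e') = false := beq_eq_false_iff_ne.mpr (fun h => h2 (Eq.symm h))
      simp [pvWordRun, List.cons_beq_cons, show pvIsWordChar 't' = true from by decide]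
      by_cases hwb : pvIsWordChar b = true <;> simp [hwb] <;>
        exact fun h => absurd (Eq.symm h) h2
    by_cases h3 : 'l' = c; swap
    · rw [if_neg (fun h => h3 h.2.2.1)]
      subst h1; subst h2
      have : (c == 'l') = false := beq_eq_false_iff_ne.mpr (fun h => h3 (Eq.symm h))
      simp [pvWordRun, List.cons_beq_cons, show pvIsWordChar 't' = true from by decide,
        show pvIsWordChar 'e' = true from by decide]
      by_cases hwc : pvIsWordChar c = true <;> simp [hwc] <;>
        exact fun h => absurd (Eq.symm h) h3
    by_cases h4 : 'l' = d; swap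
    · rw [if_neg (fun h => h4 h.2.2.2.1)]
      subst h1; subst h2; subst h3
      have : (d == 'l') = false := beq_eq_false_iff_ne.mpr (fun h => h4 (Eq.symm h))
      simp [pvWordRun, List.cons_beq_cons, show pvIsWordChar 't' = true from by decide,
        show pvIsWordChar 'e' = true from by decide, show pvIsWordChar 'l' = true from by decide]
      by_cases hwd : pvIsWordChar d = true <;> simp [hwd] <;>
        exact fun h => absurd (Eq.symm h) h4
    by_cases h5 : ' ' = e; swap
    · rw [if_neg (fun h => h5 h.2.2.2.2.1)]
      have : (e == ' ') = false := beq_eq_false_iff_ne.mpr (fun h => h5 (Eq.symm h))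
      simp [this]
    subst h1; subst h2; subst h3; subst h4; subst h5
    have hme := pvCheckA_word ['m','e'] (by decide) rest
    simp only [pvCheckA] at hme
    by_cases hpre : ['m','e'] <+: rest
    · rw [if_pos (by exact ⟨rfl, rfl, rfl, rfl, rfl, hpre⟩)]
      rw [if_pos hpre] at hme
      simp [pvWordRun, show pvIsWordChar 't' = true from by decide,
        show pvIsWordChar 'e' = true from by decide, show pvIsWordChar 'l' = true from by decide,
        show pvIsWordChar ' ' = false from by decide]
      by_cases hlen : rest.length ≤ 2
      · rw [if_pos (by simpa using hlen)] at hme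
        simp [show rest.length + 1 + 1 + 1 + 1 < 7 from by omega, ← hme]
      · rw [if_neg (by simpa using hlen)] at hme
        simp [show ¬ (rest.length + 1 + 1 + 1 + 1 < 7) from by omega]
        simpa using hme
    · rw [if_neg (fun h => hpre h.2.2.2.2.2)]
      rw [if_neg hpre] at hme
      simp [pvWordRun, show pvIsWordChar 't' = true from by decide,
        show pvIsWordChar 'e' = true from by decide, show pvIsWordChar 'l' = true from by decide,
        show pvIsWordChar ' ' = false from by decide, ← hme]

theorem pvALoop_cons (s pfx : String) (rest : List String) :
    pvALoop s (pfx :: rest) = (pvCheckA pfx.toList s.toList || pvALoop s rest) := by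
  simp only [pvALoop, pvCheckA, PySem.Str.startswith_eq, pv_startswith_decide, PySem.Str.len_eq]
  by_cases hp : pfx.toList <+: s.toList
  · rw [if_pos (by simpa using hp), if_pos hp]
    by_cases hl : s.toList.length ≤ pfx.toList.length
    · have h1 : (pfx.toList.length : Int) ≥ (s.toList.length : Int) := by exact_mod_cast hl
      rw [if_pos h1, if_pos hl]; simp
    · have h1 : ¬ ((pfx.toList.length : Int) ≥ (s.toList.length : Int)) :=
        fun h => hl (by exact_mod_cast h)
      rw [if_neg h1, if_neg hl]
      have h3 : PySem.Str.pyGet? s ((pfx.toList.length : Nat) : Int) = s.toList[pfx.toList.length]? :=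
        PySem.Str.pyGet?_natCast s _
      rw [h3]
      cases s.toList[pfx.toList.length]? with
      | none => simp
      | some t => by_cases ht : ((!PySem.Chars.isalnum t) && !(t == '_')) = true <;> simp [ht]
  · rw [if_neg (by simpa using hp), if_neg hp]
    simp

theorem pv_contains (r : List Char) :
    pvQuestionWords.contains r
      = ((r == ['w','h','a','t']) || ((r == ['w','h','y']) || ((r == ['h','o','w']) ||
          ((r == ['w','h','i','c','h']) || ((r == ['w','h','o']) ||
          ((r == ['e','x','p','l','a','i','n']) || false)))))) := by
  rw [Bool.eq_iff_iff]
  simp only [List.contains_iff_mem, pvQuestionWords, List.map, List.mem_cons,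
    List.not_mem_nil, or_false, Bool.or_eq_true, beq_iff_eq]
  tauto

theorem pv_key (x1 x2 x3 x4 x5 x6 T : Bool) :
    (x1 || (x2 || (x3 || (x4 || (x5 || (T || (x6 || false)))))))
      = (if (x1 || (x2 || (x3 || (x4 || (x5 || (x6 || false)))))) then true else T) := by
  revert x1 x2 x3 x4 x5 x6 T; decide

theorem pv_main (s : String) :
    pvALoop s pvQuestionFormPrefixes =
      (if pvQuestionWords.contains (pvWordRun s.toList) then true
       else (pvWordRun s.toList == "tell".toList)
         && ((PySem.List.slice s.toList (some 4) (some 5) == [' '])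
         && (pvWordRun (PySem.List.slice s.toList (some 5) none) == "me".toList))) := by
  have t1 : "what".toList = ['w','h','a','t'] := rfl
  have t2 : "why".toList = ['w','h','y'] := rfl
  have t3 : "how".toList = ['h','o','w'] := rfl
  have t4 : "which".toList = ['w','h','i','c','h'] := rfl
  have t5 : "who".toList = ['w','h','o'] := rfl
  have t6 : "tell me".toList = ['t','e','l','l',' ','m','e'] := rfl
  have t7 : "explain".toList = ['e','x','p','l','a','i','n'] := rfl
  have t8 : "tell".toList = ['t','e','l','l'] := rfl
  have t9 : "me".toList = ['m','e'] := rfl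
  have hs4 : PySem.List.slice s.toList (some 4) (some 5) = (s.toList.drop 4).take 1 := by
    simpa using PySem.List.slice_natCast s.toList 4 5
  have hs5 : PySem.List.slice s.toList (some 5) none = s.toList.drop 5 := by
    simpa using PySem.List.slice_from s.toList (by norm_num : (0:Int) ≤ 5)
  have w1 := pvCheckA_word ['w','h','a','t'] (by decide) s.toList
  have w2 := pvCheckA_word ['w','h','y'] (by decide) s.toList
  have w3 := pvCheckA_word ['h','o','w'] (by decide) s.toList
  have w4 := pvCheckA_word ['w','h','i','c','h'] (by decide) s.toList
  have w5 := pvCheckA_word ['w','h','o'] (by decide) s.toList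
  have w7 := pvCheckA_word ['e','x','p','l','a','i','n'] (by decide) s.toList
  have hnil : pvALoop s [] = false := rfl
  simp only [pvQuestionFormPrefixes, pvALoop_cons, hnil, t1, t2, t3, t4, t5, t6, t7, t8, t9,
    hs4, hs5, w1, w2, w3, w4, w5, w7, pvCheckA_tellme, pv_contains, Bool.and_assoc]
  exact pv_key _ _ _ _ _ _ _

-- ===== VERDICT (by name: the statement is the Claim_ definition above) =====
theorem starts_with_question_form_py_spec : Claim_equal_starts_with_question_form_py := by
  intro text _
  unfold Spec_starts_with_question_form_py starts_with_question_form_py starts_with_question_form_py_alt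
  exact pv_main (PySem.Str.lower (PySem.Str.lstrip text))
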